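-- pv_equiv track=rewrite | github.com/Kaluza05/Studia | zimowy24-25/wstep do pythona/lista11/z2.py | PPN
-- ===== SOURCE A (Python) =====
-- def PPN(word:str):
--     perm = ''
--     n = 1
--     used = {}
--     for i in word:
--         if i not in used:
--             used[i] = n
--             n+=1
--         perm += str(used[i]) + '-'
--
--     perm = perm[:-1]
--     return perm
-- ===== SOURCE B (Python) =====
-- def PPN(word: str):
--     # Label of c = 1 + number of distinct characters strictly before c's first occurrence.
--     return '-'.join(str(1 + len(set(word[:word.index(c)]))) for c in word)
-- ===== Notes on version B (the rewrite author's own statement) =====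
-- stated objective: alternative
-- what changed: A's stateful single loop (mutating a rank dict while appending digits and trimming a trailing dash) is replaced by a stateless per-character recomputation: each label is 1 + len(set(word[:word.index(c)])) (distinct characters before c's first occurrence), dash-joined; no rank table or mutable state, at the price of quadratic work.
import Mathlib
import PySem

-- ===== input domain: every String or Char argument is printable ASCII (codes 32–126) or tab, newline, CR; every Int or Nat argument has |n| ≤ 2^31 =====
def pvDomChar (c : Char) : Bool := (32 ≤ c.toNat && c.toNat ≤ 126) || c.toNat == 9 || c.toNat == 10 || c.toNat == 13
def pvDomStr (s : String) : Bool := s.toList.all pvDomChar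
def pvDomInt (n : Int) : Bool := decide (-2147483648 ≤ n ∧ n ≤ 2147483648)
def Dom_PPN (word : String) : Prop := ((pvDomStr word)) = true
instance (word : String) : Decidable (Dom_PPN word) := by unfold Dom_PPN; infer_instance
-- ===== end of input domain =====

-- B drops A's stateful loop (mutating rank dict + append + trailing-dash trim) entirely:
-- each character's label is recomputed independently as 1 + |set of chars before its first
-- occurrence|, and the labels are dash-joined.

-- ===== PORT A =====
-- one step of A's for-loop; state = (perm as char list, n, used)
def PPNstep (st : List Char × Int × PySem.Dict Char Int) (i : Char) :
    List Char × Int × PySem.Dict Char Int :=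
  let used := if st.2.2.contains i then st.2.2 else st.2.2.insert i st.2.1
  let n := if st.2.2.contains i then st.2.1 else st.2.1 + 1
  (st.1 ++ (PySem.Int.toStr (used.getD i 0)).toList ++ ['-'], n, used)

def PPN (word : String) : String :=
  let st := word.toList.foldl PPNstep ([], 1, PySem.Dict.mk [])
  -- perm = perm[:-1] : drop the final character (empty-safe), then return
  String.ofList st.1.dropLast

-- ===== PORT B =====
def PPN_alt (word : String) : String :=
  -- str(1 + len(set(word[:word.index(c)]))) for each c of word, joined with '-'.
  -- word.index(c) on a 1-char needle = list index of c; c is drawn from word itself, so the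
  -- index always exists and the .getD 0 default is unreachable (Python would raise otherwise).
  PySem.Str.join "-" (word.toList.map (fun c =>
    PySem.Int.toStr (1 + PySem.Set.len (PySem.Set.ofList
      (PySem.List.slice word.toList none
        (some (((PySem.List.index? word.toList c).getD 0 : Nat) : Int)))))))

-- ===== PRECONDITION & SPEC =====
def Spec_PPN (word : String) (out : String) : Prop := out = PPN_alt word
instance (word : String) (out : String) : Decidable (Spec_PPN word out) := by unfold Spec_PPN; infer_instance

-- ===== CLAIM (what is proved, stated in full; the proofs are below) =====
def Claim_equal_PPN : Prop := ∀ (word : String), Dom_PPN word → Spec_PPN word (PPN word)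

-- ===== LEMMAS AND PROOFS =====

-- the rank dictionary of a list of (distinct) chars, numbered from s
def rkDict (acc : List Char) (s : Int) : PySem.Dict Char Int :=
  PySem.Dict.mk ((PySem.List.enumerate acc s).map (fun p => (p.2, p.1)))

lemma rkDict_getD (acc : List Char) (s : Int) (c : Char) (h : c ∈ acc) :
    (rkDict acc s).getD c 0 = s + (acc.idxOf c : Int) := by
  induction acc generalizing s with
  | nil => cases h
  | cons a t ih =>
    simp only [rkDict, PySem.List.enumerate_cons, List.map_cons] at h ih ⊢
    by_cases hc : a = c
    · subst hc
      simp [PySem.Dict.getD, PySem.Dict.get?_mk_cons, List.idxOf_cons_self]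
    · have hct : c ∈ t := by
        rcases List.mem_cons.mp h with h' | h' ; · exact absurd h'.symm hc
        · exact h'
      have := ih (s + 1) hct
      simp only [PySem.Dict.getD, PySem.Dict.get?_mk_cons, beq_iff_eq, hc, if_false] at this ⊢
      rw [this]
      rw [List.idxOf_cons_ne _ (show a ≠ c from hc)]
      simp only [Nat.succ_eq_add_one]
      push_cast
      ring

lemma rkDict_contains (acc : List Char) (s : Int) (c : Char) :
    (rkDict acc s).contains c = decide (c ∈ acc) := by
  induction acc generalizing s with
  | nil => simp [rkDict, PySem.Dict.contains, PySem.List.enumerate_nil]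
  | cons a t ih =>
    have h := ih (s + 1)
    simp only [rkDict, PySem.List.enumerate_cons, List.map_cons, PySem.Dict.contains] at h ⊢
    rw [List.any_cons, h]
    by_cases hc : c = a
    · subst hc; simp
    · have hb : (((s, a), (a, s)).2.1 == c) = false := by
        simp only [beq_eq_false_iff_ne]; exact fun h' => hc h'.symm
      simp only at hb
      simp [hb, List.mem_cons, hc]

lemma rkDict_insert_fresh (acc : List Char) (c : Char) (hc : c ∉ acc) :
    (rkDict acc 1).insert c ((acc.length : Int) + 1) = rkDict (acc ++ [c]) 1 := by
  have hcont : (rkDict acc 1).contains c = false := by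
    rw [rkDict_contains]; simpa using hc
  simp only [PySem.Dict.insert, hcont, Bool.false_eq_true, if_false]
  simp only [rkDict, PySem.List.enumerate_append, List.map_append, PySem.List.enumerate_cons,
    PySem.List.enumerate_nil, List.map_cons, List.map_nil]
  norm_num [add_comm]

-- Set.update only appends
lemma update_append (acc l : List Char) : ∃ t, PySem.Set.update acc l = acc ++ t := by
  induction l generalizing acc with
  | nil => exact ⟨[], by simp [PySem.Set.update]⟩
  | cons c l ih =>
    show ∃ t, PySem.Set.update (PySem.Set.add acc c) l = acc ++ t
    by_cases hc : c ∈ acc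
    · have : PySem.Set.add acc c = acc := by simp [PySem.Set.add, hc]
      rw [this]; exact ih acc
    · have : PySem.Set.add acc c = acc ++ [c] := by simp [PySem.Set.add, hc]
      rw [this]
      obtain ⟨t, ht⟩ := ih (acc ++ [c])
      exact ⟨[c] ++ t, by simp [ht]⟩

-- idxOf is stable under appending, for members
lemma idxOf_append_left (acc t : List Char) (c : Char) (h : c ∈ acc) :
    (acc ++ t).idxOf c = acc.idxOf c := by
  induction acc with
  | nil => cases h
  | cons a u ih =>
    by_cases hc : a = c
    · subst hc; simp [List.idxOf_cons_self]
    · have : c ∈ u := by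
        rcases List.mem_cons.mp h with h' | h' ; · exact absurd h'.symm hc
        · exact h'
      simp only [List.cons_append]
      rw [List.idxOf_cons_ne _ (show a ≠ c from hc),
          List.idxOf_cons_ne _ (show a ≠ c from hc), ih this]

-- the first index of c in acc ++ c :: t, when c is not in acc
lemma idxOf_append_self (acc t : List Char) (c : Char) (h : c ∉ acc) :
    (acc ++ c :: t).idxOf c = acc.length := by
  induction acc with
  | nil => simp [List.idxOf_cons_self]
  | cons a u ih =>
    have hac : a ≠ c := fun h' => h (h' ▸ List.mem_cons_self)
    have hcu : c ∉ u := fun h' => h (List.mem_cons_of_mem _ h')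
    simp only [List.cons_append, List.length_cons]
    rw [List.idxOf_cons_ne _ hac, ih hcu]

-- main invariant for A's loop
lemma PPN_loop (l : List Char) : ∀ (acc : List Char) (perm : List Char),
    l.foldl PPNstep (perm, (acc.length : Int) + 1, rkDict acc 1)
      = (perm ++ l.flatMap
           (fun c => (PySem.Int.toStr (((PySem.Set.update acc l).idxOf c : Int) + 1)).toList ++ ['-']),
         ((PySem.Set.update acc l).length : Int) + 1, rkDict (PySem.Set.update acc l) 1) := by
  induction l with
  | nil => intro acc perm; simp [PySem.Set.update]
  | cons c l ih =>
    intro acc perm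
    have hmem_upd : ∀ (a : List Char) (x : Char), x ∈ a → ∀ m, m = PySem.Set.update a l →
        ((m.idxOf x : Int)) = (a.idxOf x : Int) := by
      intro a x hx m hm
      obtain ⟨t, ht⟩ := update_append a l
      rw [hm, ht, idxOf_append_left _ _ _ hx]
    by_cases hc : c ∈ acc
    · -- seen before: dict and n unchanged
      have hcont : (rkDict acc 1).contains c = true := by
        rw [rkDict_contains]; simpa using hc
      have hstep : PPNstep (perm, (acc.length : Int) + 1, rkDict acc 1) c
          = (perm ++ (PySem.Int.toStr ((acc.idxOf c : Int) + 1)).toList ++ ['-'],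
             (acc.length : Int) + 1, rkDict acc 1) := by
        simp only [PPNstep, hcont, if_true]
        rw [rkDict_getD acc 1 c hc, add_comm]
      show (c :: l).foldl PPNstep (perm, (acc.length : Int) + 1, rkDict acc 1) = _
      rw [List.foldl_cons, hstep, ih acc _]
      have hupd : PySem.Set.update acc (c :: l) = PySem.Set.update acc l := by
        show PySem.Set.update (PySem.Set.add acc c) l = _
        have hadd : PySem.Set.add acc c = acc := by simp [PySem.Set.add, hc]
        rw [hadd]
      rw [List.flatMap_cons]
      have hidx : ((PySem.Set.update acc (c :: l)).idxOf c : Int) = (acc.idxOf c : Int) := by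
        exact hmem_upd acc c hc _ (by rw [hupd])
      rw [hupd] at hidx ⊢
      rw [hidx]
      simp
    · -- new char: appended to dict with rank acc.length + 1
      have hcont : (rkDict acc 1).contains c = false := by
        rw [rkDict_contains]; simpa using hc
      have hadd : PySem.Set.add acc c = acc ++ [c] := by simp [PySem.Set.add, hc]
      have hins := rkDict_insert_fresh acc c hc
      have hstep : PPNstep (perm, (acc.length : Int) + 1, rkDict acc 1) c
          = (perm ++ (PySem.Int.toStr (((acc ++ [c]).idxOf c : Int) + 1)).toList ++ ['-'],
             ((acc ++ [c]).length : Int) + 1, rkDict (acc ++ [c]) 1) := by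
        simp only [PPNstep, hcont, Bool.false_eq_true, if_false, hins]
        have : ((acc ++ [c]).idxOf c : Int) + 1 = 1 + (((acc ++ [c]).idxOf c : Nat) : Int) := by ring
        rw [this, ← rkDict_getD (acc ++ [c]) 1 c (by simp)]
        simp
      show (c :: l).foldl PPNstep (perm, (acc.length : Int) + 1, rkDict acc 1) = _
      rw [List.foldl_cons, hstep, ih (acc ++ [c]) _]
      have hupd : PySem.Set.update acc (c :: l) = PySem.Set.update (acc ++ [c]) l := by
        show PySem.Set.update (PySem.Set.add acc c) l = _
        rw [hadd]
      rw [List.flatMap_cons, hupd]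
      have hidx : ((PySem.Set.update (acc ++ [c]) l).idxOf c : Int) = ((acc ++ [c]).idxOf c : Int) :=
        hmem_upd (acc ++ [c]) c (by simp) _ rfl
      rw [hidx]
      simp

-- '-'-join is flatMap-with-dash minus the trailing dash
lemma join_dash_eq (xs : List (List Char)) :
    PySem.Chars.join ['-'] xs = (xs.flatMap (fun s => s ++ ['-'])).dropLast := by
  induction xs with
  | nil => simp [PySem.Chars.join, List.intercalate]
  | cons a t ih =>
    cases t with
    | nil => simp [PySem.Chars.join, List.intercalate]
    | cons b u =>
      have hne : ((b :: u).flatMap (fun s => s ++ ['-'])) ≠ [] := by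
        simp [List.flatMap_cons]
      have : PySem.Chars.join ['-'] (a :: b :: u) = a ++ ['-'] ++ PySem.Chars.join ['-'] (b :: u) := by
        simp [PySem.Chars.join, List.intercalate, List.intersperse]
      rw [this, ih]
      conv_rhs => rw [List.flatMap_cons, List.dropLast_append_of_ne_nil hne]

-- B's per-character count: |set(l[:idxOf c])| (seen through any accumulator of already-seen
-- distinct chars not containing c) is the index of c among the distinct chars of l
lemma prefix_distinct_eq_idxOf (l : List Char) : ∀ (acc : List Char) (c : Char),
    c ∉ acc → c ∈ l →
    (PySem.Set.update acc (l.take (l.idxOf c))).length = (PySem.Set.update acc l).idxOf c := by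
  induction l with
  | nil => intro _ _ _ h; cases h
  | cons a t ih =>
    intro acc c hca hcl
    by_cases hac : a = c
    · subst hac
      rw [List.idxOf_cons_self, List.take_zero]
      have hadd : PySem.Set.add acc a = acc ++ [a] := by simp [PySem.Set.add, hca]
      rw [PySem.Set.update_nil, PySem.Set.update_cons, hadd]
      obtain ⟨t', ht'⟩ := update_append (acc ++ [a]) t
      rw [ht', List.append_assoc, List.singleton_append, idxOf_append_self _ _ _ hca]
    · have hct : c ∈ t := by
        rcases List.mem_cons.mp hcl with h' | h' ; · exact absurd h'.symm hac
        · exact h'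
      rw [List.idxOf_cons_ne _ (show a ≠ c from hac), List.take_succ_cons,
        PySem.Set.update_cons, PySem.Set.update_cons]
      have hca' : c ∉ PySem.Set.add acc a := by
        rw [PySem.Set.mem_add]
        rintro (h | h)
        · exact hca h
        · exact hac h.symm
      exact ih (PySem.Set.add acc a) c hca' hct

lemma index?_mem_eq (l : List Char) (c : Char) (h : c ∈ l) :
    PySem.List.index? l c = some (l.idxOf c) := by
  rw [PySem.List.index?_eq_idxOf?]
  induction l with
  | nil => cases h
  | cons a t ih =>
    by_cases hac : a = c
    · subst hac; simp [List.idxOf?_cons, List.idxOf_cons_self]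
    · have hct : c ∈ t := by
        rcases List.mem_cons.mp h with h' | h' ; · exact absurd h'.symm hac
        · exact h'
      have hb : (a == c) = false := by simpa using hac
      simp only [List.idxOf?_cons, List.idxOf_cons_ne _ (show a ≠ c from hac), hb,
        Bool.false_eq_true, if_false, ih hct, Option.map_some]

-- ===== VERDICT (by name: the statement is the Claim_ definition above) =====
theorem PPN_spec : Claim_equal_PPN := by
  intro word _
  show PPN word = PPN_alt word
  apply String.toList_inj.mp
  simp only [PPN, PPN_alt]
  rw [String.toList_ofList]
  have hloop := PPN_loop word.toList [] []
  have h0 : rkDict [] 1 = PySem.Dict.mk [] := by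
    simp [rkDict, PySem.List.enumerate_nil]
  simp only [List.length_nil, Nat.cast_zero, zero_add, h0] at hloop
  rw [hloop]
  rw [PySem.Str.toList_join]
  have hdash : ("-" : String).toList = ['-'] := rfl
  rw [hdash, List.map_map, join_dash_eq, List.nil_append]
  dsimp only
  refine congrArg List.dropLast ?_
  rw [List.flatMap_def, List.flatMap_def, List.map_map]
  refine congrArg List.flatten (List.map_congr_left ?_)
  intro c hcmem
  simp only [Function.comp]
  rw [index?_mem_eq word.toList c hcmem, Option.getD_some,
    PySem.List.slice_to_natCast]
  have hcnt := prefix_distinct_eq_idxOf word.toList [] c (by simp) hcmem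
  have hlen : PySem.Set.len (PySem.Set.ofList (word.toList.take (word.toList.idxOf c)))
      = ((PySem.Set.update [] word.toList).idxOf c : Int) := by
    rw [← hcnt]
    simp [PySem.Set.len, PySem.Set.update, PySem.Set.ofList_eq_foldl]
  rw [hlen, add_comm]
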